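-- pv_equiv track=rewrite | github.com/BlockSettle/BlockSettleDB | armoryengine/AddressUtils.py | addrTypeInSet
-- ===== SOURCE A (Python) =====
-- AddressEntryType_P2SH = 0x40000000
--
-- AddressEntryType_P2WSH = 0x80000000
--
-- def addrTypeInSet(addrType, addrTypeSet):
--    if addrType in addrTypeSet:
--       return True
--
--    def nestedSearch(nestedType):
--       if not (addrType & nestedType):
--          return False
--
--       for aType in addrTypeSet:
--          if aType & nestedType:
--             return True
--       return False
--
--    #couldn't find an exact address type match, try to filter by nested types
--    if nestedSearch(AddressEntryType_P2SH):
--       return True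
--
--    if nestedSearch(AddressEntryType_P2WSH):
--       return True
--
--    return False
-- ===== SOURCE B (Python) =====
-- AddressEntryType_P2SH = 0x40000000
--
-- AddressEntryType_P2WSH = 0x80000000
--
-- def addrTypeInSet(addrType, addrTypeSet):
--    if addrType in addrTypeSet:
--       return True
--
--    # single aggregation pass: OR all members together, then one closed-form
--    # bitmask test against the two nested-type bits
--    combined = 0
--    for aType in addrTypeSet:
--       combined |= aType
--
--    return bool(addrType & combined & (AddressEntryType_P2SH | AddressEntryType_P2WSH))
-- ===== Notes on version B (the rewrite author's own statement) =====
-- stated objective: simpler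
-- what changed: Replaces the nested-search helper with its two guarded scans over the set by one OR-aggregation pass and a single closed-form bitmask test addrType & combined & (P2SH|P2WSH), exploiting that the two nested flags are single bits.
import Mathlib
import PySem

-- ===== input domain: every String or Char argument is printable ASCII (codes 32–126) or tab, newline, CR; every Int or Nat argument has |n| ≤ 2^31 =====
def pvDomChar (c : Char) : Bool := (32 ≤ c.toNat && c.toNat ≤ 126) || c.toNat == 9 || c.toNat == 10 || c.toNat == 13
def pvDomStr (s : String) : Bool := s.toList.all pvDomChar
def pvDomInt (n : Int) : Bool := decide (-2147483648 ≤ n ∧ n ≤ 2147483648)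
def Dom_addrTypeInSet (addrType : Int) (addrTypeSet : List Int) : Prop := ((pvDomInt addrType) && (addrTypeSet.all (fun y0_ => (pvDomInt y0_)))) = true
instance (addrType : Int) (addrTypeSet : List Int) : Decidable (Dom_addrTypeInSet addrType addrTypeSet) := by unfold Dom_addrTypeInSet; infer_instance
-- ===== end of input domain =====

-- B replaces A's per-flag nested searches over the set by one OR-aggregation pass and a
-- single closed-form bitmask test (objective: simpler).

-- ===== PORT A =====
-- the 'for aType in addrTypeSet: if aType & nestedType: return True' loop of nestedSearch
def nestedSearchLoop (nestedType : Int) (l : List Int) : Bool :=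
  match l with
  | [] => false
  | aType :: rest =>
      if PySem.Int.band aType nestedType ≠ 0 then true else nestedSearchLoop nestedType rest

-- the inner helper 'nestedSearch' (closes over addrType and addrTypeSet)
def nestedSearch (addrType : Int) (addrTypeSet : List Int) (nestedType : Int) : Bool :=
  if PySem.Int.band addrType nestedType = 0 then false
  else nestedSearchLoop nestedType addrTypeSet

def addrTypeInSet (addrType : Int) (addrTypeSet : List Int) : Bool :=
  if addrTypeSet.contains addrType then true
  else if nestedSearch addrType addrTypeSet 1073741824 then true   -- AddressEntryType_P2SH
  else if nestedSearch addrType addrTypeSet 2147483648 then true   -- AddressEntryType_P2WSH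
  else false

-- ===== PORT B =====
def addrTypeInSet_alt (addrType : Int) (addrTypeSet : List Int) : Bool :=
  if addrTypeSet.contains addrType then true
  else
    let combined := addrTypeSet.foldl (fun acc aType => PySem.Int.bor acc aType) 0
    -- bool(addrType & combined & (P2SH | P2WSH)); 3221225472 = 0x40000000 | 0x80000000
    decide (PySem.Int.band (PySem.Int.band addrType combined) 3221225472 ≠ 0)

-- ===== PRECONDITION & SPEC =====
def Spec_addrTypeInSet (addrType : Int) (addrTypeSet : List Int) (out : Bool) : Prop := out = addrTypeInSet_alt addrType addrTypeSet
instance (addrType : Int) (addrTypeSet : List Int) (out : Bool) : Decidable (Spec_addrTypeInSet addrType addrTypeSet out) := by unfold Spec_addrTypeInSet; infer_instance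

-- ===== CLAIM (what is proved, stated in full; the proofs are below) =====
def Claim_equal_addrTypeInSet : Prop := ∀ (addrType : Int) (addrTypeSet : List Int), Dom_addrTypeInSet addrType addrTypeSet → Spec_addrTypeInSet addrType addrTypeSet (addrTypeInSet addrType addrTypeSet)

-- ===== LEMMAS AND PROOFS =====

-- Bit k of an Int in Python's infinite two's-complement reading.
def tb (x : Int) (k : Nat) : Bool :=
  if 0 ≤ x then x.toNat.testBit k else !((-x - 1).toNat.testBit k)

theorem and_add_ldiff (m n : ℕ) : (m &&& n) + Nat.ldiff m n = m := by
  induction m using Nat.binaryRec generalizing n with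
  | zero =>
      simp only [Nat.zero_and, Nat.zero_add]
      apply Nat.eq_of_testBit_eq
      intro i
      simp [Nat.testBit_ldiff]
  | bit b m ih =>
      rw [← Nat.bit_testBit_zero_shiftRight_one n, Nat.land_bit, Nat.ldiff_bit,
        Nat.bit_val, Nat.bit_val, Nat.bit_val]
      have := ih (n >>> 1)
      cases b <;> cases n.testBit 0 <;> simp <;> omega

theorem sub_and_eq_ldiff (m n : ℕ) : m - (m &&& n) = Nat.ldiff m n := by
  have := and_add_ldiff m n
  omega

theorem tb_band (a b : Int) (k : Nat) : tb (PySem.Int.band a b) k = (tb a k && tb b k) := by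
  unfold PySem.Int.band tb
  rcases le_or_gt 0 a with ha | ha <;> rcases le_or_gt 0 b with hb | hb
  · simp [ha, hb]
  · have h1 : ¬ (0:Int) ≤ b := by omega
    simp only [ha, h1, if_pos, if_false]
    rw [sub_and_eq_ldiff]
    simp [Nat.testBit_ldiff]
  · have h1 : ¬ (0:Int) ≤ a := by omega
    simp [hb, h1, sub_and_eq_ldiff, Nat.testBit_ldiff, Bool.and_comm]
  · have h1 : ¬ (0:Int) ≤ a := by omega
    have h2 : ¬ (0:Int) ≤ b := by omega
    have h3 : ¬ (0:Int) ≤ -((((-a - 1).toNat ||| (-b - 1).toNat : ℕ) : Int)) - 1 := by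
      have := Int.natCast_nonneg ((-a - 1).toNat ||| (-b - 1).toNat)
      omega
    simp only [h1, h2, h3, if_false]
    have h4 : (-(-(((-a - 1).toNat ||| (-b - 1).toNat : ℕ) : Int) - 1) - 1) = (((-a - 1).toNat ||| (-b - 1).toNat : ℕ) : Int) := by ring
    rw [h4, Int.toNat_natCast, Nat.testBit_lor]
    simp

theorem tb_bor (a b : Int) (k : Nat) : tb (PySem.Int.bor a b) k = (tb a k || tb b k) := by
  unfold PySem.Int.bor tb
  rcases le_or_gt 0 a with ha | ha <;> rcases le_or_gt 0 b with hb | hb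
  · simp [ha, hb]
  · have h1 : ¬ (0:Int) ≤ b := by omega
    have h3 : ¬ (0:Int) ≤ -((((-b - 1).toNat - ((-b - 1).toNat &&& a.toNat) : ℕ) : Int)) - 1 := by
      have := Int.natCast_nonneg ((-b - 1).toNat - ((-b - 1).toNat &&& a.toNat))
      omega
    simp only [ha, h1, h3, if_true, if_false]
    have h4 : (-(-((((-b - 1).toNat - ((-b - 1).toNat &&& a.toNat) : ℕ) : Int)) - 1) - 1) = ((((-b - 1).toNat - ((-b - 1).toNat &&& a.toNat) : ℕ) : Int)) := by ring
    rw [h4, Int.toNat_natCast, sub_and_eq_ldiff, Nat.testBit_ldiff]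
    simp [Bool.or_comm]
  · have h1 : ¬ (0:Int) ≤ a := by omega
    have h3 : ¬ (0:Int) ≤ -((((-a - 1).toNat - ((-a - 1).toNat &&& b.toNat) : ℕ) : Int)) - 1 := by
      have := Int.natCast_nonneg ((-a - 1).toNat - ((-a - 1).toNat &&& b.toNat))
      omega
    simp only [h1, hb, h3, if_true, if_false]
    have h4 : (-(-((((-a - 1).toNat - ((-a - 1).toNat &&& b.toNat) : ℕ) : Int)) - 1) - 1) = ((((-a - 1).toNat - ((-a - 1).toNat &&& b.toNat) : ℕ) : Int)) := by ring
    rw [h4, Int.toNat_natCast, sub_and_eq_ldiff, Nat.testBit_ldiff]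
    cases (-a - 1).toNat.testBit k <;> cases b.toNat.testBit k <;> simp
  · have h1 : ¬ (0:Int) ≤ a := by omega
    have h2 : ¬ (0:Int) ≤ b := by omega
    have h3 : ¬ (0:Int) ≤ -((((-a - 1).toNat &&& (-b - 1).toNat : ℕ) : Int)) - 1 := by
      have := Int.natCast_nonneg ((-a - 1).toNat &&& (-b - 1).toNat)
      omega
    simp only [h1, h2, h3, if_false]
    have h4 : (-(-(((-a - 1).toNat &&& (-b - 1).toNat : ℕ) : Int) - 1) - 1) = (((-a - 1).toNat &&& (-b - 1).toNat : ℕ) : Int) := by ring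
    rw [h4, Int.toNat_natCast, Nat.testBit_land]
    simp

theorem tb_zero (k : Nat) : tb 0 k = false := by simp [tb]

theorem nonneg_ne_zero_iff (z : Int) (hz : 0 ≤ z) : z ≠ 0 ↔ ∃ i, tb z i = true := by
  constructor
  · intro h
    by_contra hc
    apply h
    have hall : ∀ i, tb z i = false := by
      intro i
      cases hE : tb z i
      · rfl
      · exact absurd ⟨i, hE⟩ hc
    have : z.toNat = 0 := by
      apply Nat.eq_of_testBit_eq
      intro i
      have := hall i
      simpa [tb, hz] using this
    omega
  · rintro ⟨i, hi⟩ h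
    subst h
    simp [tb] at hi

theorem tb_pow (k i : Nat) : tb (((2:ℕ)^k : ℕ) : Int) i = decide (k = i) := by
  have h0 : (0:Int) ≤ (((2:ℕ)^k : ℕ) : Int) := Int.natCast_nonneg _
  simp only [tb, h0, if_true, Int.toNat_natCast, Nat.testBit_two_pow]

theorem band_pow_ne (x : Int) (k : Nat) :
    (PySem.Int.band x (((2:ℕ)^k : ℕ) : Int) ≠ 0) ↔ tb x k = true := by
  have hnn : 0 ≤ PySem.Int.band x (((2:ℕ)^k : ℕ) : Int) := by
    rw [PySem.Int.band_comm]
    exact PySem.Int.band_nonneg_of_nonneg_left _ (Int.natCast_nonneg _)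
  rw [nonneg_ne_zero_iff _ hnn]
  constructor
  · rintro ⟨i, hi⟩
    rw [tb_band, tb_pow] at hi
    rcases Bool.and_eq_true_iff.mp hi with ⟨h1, h2⟩
    have : k = i := by simpa using h2
    subst this; exact h1
  · intro h
    exact ⟨k, by rw [tb_band, tb_pow]; simp [h]⟩

theorem tb_mask (i : Nat) : tb (3221225472 : Int) i = (decide (i = 30) || decide (i = 31)) := by
  have h : (3221225472 : Int) = ((3221225472:ℕ) : Int) := by norm_num
  rw [h]
  have h2 : (3221225472:ℕ) = 2^30 ||| 2^31 := by decide
  simp only [tb, Int.toNat_natCast, h2, Nat.testBit_lor, Nat.testBit_two_pow]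
  by_cases h30 : i = 30 <;> by_cases h31 : i = 31 <;> (simp [h30, h31]; try omega)

theorem band_mask_ne (y : Int) :
    (PySem.Int.band y 3221225472 ≠ 0) ↔ (tb y 30 = true ∨ tb y 31 = true) := by
  have hnn : 0 ≤ PySem.Int.band y 3221225472 := by
    rw [PySem.Int.band_comm]
    exact PySem.Int.band_nonneg_of_nonneg_left _ (by norm_num)
  rw [nonneg_ne_zero_iff _ hnn]
  constructor
  · rintro ⟨i, hi⟩
    rw [tb_band, tb_mask] at hi
    rcases Bool.and_eq_true_iff.mp hi with ⟨h1, h2⟩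
    rcases Bool.or_eq_true_iff.mp h2 with h | h
    · exact Or.inl ((of_decide_eq_true h) ▸ h1)
    · exact Or.inr ((of_decide_eq_true h) ▸ h1)
  · rintro (h | h)
    · exact ⟨30, by simp [tb_band, tb_mask, h]⟩
    · exact ⟨31, by simp [tb_band, tb_mask, h]⟩

theorem tb_fold (l : List Int) (acc : Int) (k : Nat) :
    tb (l.foldl (fun acc aType => PySem.Int.bor acc aType) acc) k
      = (tb acc k || l.any (fun x => tb x k)) := by
  induction l generalizing acc with
  | nil => simp
  | cons x xs ih => simp [List.foldl_cons, ih, tb_bor, Bool.or_assoc]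

theorem loop_eq_any (nt : Int) (l : List Int) :
    nestedSearchLoop nt l = l.any (fun x => decide (PySem.Int.band x nt ≠ 0)) := by
  induction l with
  | nil => rfl
  | cons x xs ih =>
      unfold nestedSearchLoop
      by_cases h : PySem.Int.band x nt ≠ 0 <;> simp [h, ih]

theorem pow30 : ((2:ℕ)^30 : ℕ) = (1073741824 : ℕ) := by norm_num
theorem pow31 : ((2:ℕ)^31 : ℕ) = (2147483648 : ℕ) := by norm_num

theorem nestedSearch_eq (a : Int) (l : List Int) (k : Nat) (nt : Int)
    (hnt : nt = (((2:ℕ)^k : ℕ) : Int)) :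
    nestedSearch a l nt = (tb a k && l.any (fun x => tb x k)) := by
  unfold nestedSearch
  subst hnt
  by_cases h : PySem.Int.band a (((2:ℕ)^k : ℕ) : Int) = 0
  · rw [if_pos h]
    cases htb : tb a k
    · simp
    · exact absurd ((band_pow_ne a k).mpr htb h) (fun hc => hc)
  · rw [if_neg h, loop_eq_any, (band_pow_ne a k).mp h, Bool.true_and]
    congr 1
    funext x
    cases hxk : tb x k
    · apply decide_eq_false
      intro hc
      have hx := (band_pow_ne x k).mp hc
      rw [hxk] at hx
      cases hx
    · exact decide_eq_true ((band_pow_ne x k).mpr hxk)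

-- ===== VERDICT (by name: the statement is the Claim_ definition above) =====
theorem addrTypeInSet_spec : Claim_equal_addrTypeInSet := by
  intro a l _
  unfold Spec_addrTypeInSet addrTypeInSet addrTypeInSet_alt
  by_cases hm : l.contains a = true
  · rw [if_pos hm, if_pos hm]
  · rw [if_neg hm, if_neg hm]
    have h30 : nestedSearch a l 1073741824 = (tb a 30 && l.any (fun x => tb x 30)) := by
      apply nestedSearch_eq; rw [pow30]; norm_num
    have h31 : nestedSearch a l 2147483648 = (tb a 31 && l.any (fun x => tb x 31)) := by
      apply nestedSearch_eq; rw [pow31]; norm_num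
    have hb : (PySem.Int.band (PySem.Int.band a (l.foldl (fun acc aType => PySem.Int.bor acc aType) 0)) 3221225472 ≠ 0)
        ↔ ((tb a 30 && l.any (fun x => tb x 30)) = true ∨ (tb a 31 && l.any (fun x => tb x 31)) = true) := by
      rw [band_mask_ne]
      simp [tb_band, tb_fold, tb_zero]
    rw [h30, h31]
    by_cases hc : (tb a 30 && l.any (fun x => tb x 30)) = true
    · rw [if_pos hc]
      exact (decide_eq_true (hb.mpr (Or.inl hc))).symm
    · rw [if_neg hc]
      by_cases hd : (tb a 31 && l.any (fun x => tb x 31)) = true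
      · rw [if_pos hd]
        exact (decide_eq_true (hb.mpr (Or.inr hd))).symm
      · rw [if_neg hd]
        have hz : ¬ (PySem.Int.band (PySem.Int.band a (l.foldl (fun acc aType => PySem.Int.bor acc aType) 0)) 3221225472 ≠ 0) :=
          fun hx => (hb.mp hx).elim hc hd
        exact ((decide_eq_false hz)).symm
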